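-- pv_equiv track=rewrite | github.com/yczhangsjtu/juptex | utils.py | split_two_by_empty_line
-- ===== SOURCE A (Python) =====
-- def split_two_by_empty_line(lines):
--   left = []
--   right = []
--   target = left
--   for line in lines:
--     if line.strip() == "" and target == left:
--       target = right
--       continue
--     target.append(line)
--   return left, right
-- ===== SOURCE B (Python) =====
-- def split_two_by_empty_line(lines):
--   lines = list(lines)
--   for i, line in enumerate(lines):
--     if line.strip() == "":
--       return lines[:i], lines[i + 1:]
--   return lines, []
-- ===== Notes on version B (the rewrite author's own statement) =====
-- stated objective: simpler
-- what changed: B finds the index of the first blank line and returns the two slices around it, instead of A's element-by-element appending with a toggled target list and a value-equality test on the target.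
-- intended difference: On lists that contain a further blank line at a position j such that the lines strictly between the first blank line and j equal the lines before the first blank line (e.g. two leading blank lines), A's value comparison 'target == left' fires again and silently drops that blank line from the right part, while B keeps everything after the first blank line intact, which is the intended split ('is' was clearly meant). — e.g. on split_two_by_empty_line(["", ""]): A returns ([], []), B returns ([], [""])
import Mathlib
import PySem

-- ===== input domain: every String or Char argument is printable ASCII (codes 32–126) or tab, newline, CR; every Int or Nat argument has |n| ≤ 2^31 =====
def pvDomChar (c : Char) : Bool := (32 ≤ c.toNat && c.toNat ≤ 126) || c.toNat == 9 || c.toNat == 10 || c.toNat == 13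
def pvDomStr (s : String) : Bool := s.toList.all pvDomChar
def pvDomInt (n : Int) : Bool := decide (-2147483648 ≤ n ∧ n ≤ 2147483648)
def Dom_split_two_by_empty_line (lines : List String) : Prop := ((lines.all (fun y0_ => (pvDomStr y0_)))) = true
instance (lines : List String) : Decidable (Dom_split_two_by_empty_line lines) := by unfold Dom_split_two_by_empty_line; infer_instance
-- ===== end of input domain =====

-- B replaces A's toggled-target append loop by find-first-blank-index + two slices (simpler);
-- A's buggy value comparison 'target == left' drops some later blank lines — stated as D_ below.


-- ===== PORT A =====
-- state = (left, right, targetIsRight); 'target == left' is Python VALUE equality,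
-- so with targetIsRight it compares right = left.
def pvStepA (s : List String × List String × Bool) (line : String) :
    List String × List String × Bool :=
  match s with
  | (l, r, tr) =>
    if PySem.Str.strip line = "" ∧ (if tr then r = l else True) then (l, r, true)
    else if tr then (l, r ++ [line], true) else (l ++ [line], r, false)

def split_two_by_empty_line (lines : List String) : List String × List String :=
  match lines.foldl pvStepA ([], [], false) with
  | (l, r, _) => (l, r)

-- ===== PORT B =====
-- the 'for i, line in enumerate(lines): if blank: return' loop of Source B
def pvFindBlank : List (Int × String) → Option Int
  | [] => none
  | (i, l) :: rest => if PySem.Str.strip l = "" then some i else pvFindBlank rest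

def split_two_by_empty_line_alt (lines : List String) : List String × List String :=
  match pvFindBlank (PySem.List.enumerate lines) with
  | some i => (PySem.List.slice lines none (some i), PySem.List.slice lines (some (i + 1)) none)
  | none => (lines, [])

-- ===== PRECONDITION & SPEC =====
-- index of the first blank line (= length when there is none); used only to state D_
def pvFirstBlankIdx (lines : List String) : Nat :=
  lines.findIdx (fun s => PySem.Str.strip s == "")

-- On lists with a further blank line at a position j where the lines strictly between the first
-- blank and j equal the lines before the first blank, A's 'target == left' value comparison fires
-- again and drops that blank from the right part; B keeps everything after the first blank, the
-- intended split ('is' was meant).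
def D_split_two_by_empty_line (lines : List String) : Prop :=
  ∃ j ∈ Finset.range lines.length,
    pvFirstBlankIdx lines < j ∧
    PySem.Str.strip (lines.getD j "x") = "" ∧
    (lines.drop (pvFirstBlankIdx lines + 1)).take (j - pvFirstBlankIdx lines - 1) =
      lines.take (pvFirstBlankIdx lines)
instance (lines : List String) : Decidable (D_split_two_by_empty_line lines) := by
  unfold D_split_two_by_empty_line; infer_instance

def Spec_split_two_by_empty_line (lines : List String) (out : List String × List String) : Prop :=
  ¬ D_split_two_by_empty_line lines → out = split_two_by_empty_line_alt lines
instance (lines : List String) (out : List String × List String) : Decidable (Spec_split_two_by_empty_line lines out) := by unfold Spec_split_two_by_empty_line; infer_instance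

def pvDiffWitness_split_two_by_empty_line : List String := ["", ""]
def pvDiffWitnessOut_split_two_by_empty_line :
    (List String × List String) × (List String × List String) :=
  (([], []), ([], [""]))

-- ===== CLAIM (what is proved, stated in full; the proofs are below) =====
def Claim_unchanged_split_two_by_empty_line : Prop := ∀ (lines : List String), Dom_split_two_by_empty_line lines → Spec_split_two_by_empty_line lines (split_two_by_empty_line lines)
def Claim_changed_split_two_by_empty_line : Prop := Dom_split_two_by_empty_line (pvDiffWitness_split_two_by_empty_line) ∧ D_split_two_by_empty_line (pvDiffWitness_split_two_by_empty_line) ∧ split_two_by_empty_line (pvDiffWitness_split_two_by_empty_line) = pvDiffWitnessOut_split_two_by_empty_line.1 ∧ split_two_by_empty_line_alt (pvDiffWitness_split_two_by_empty_line) = pvDiffWitnessOut_split_two_by_empty_line.2 ∧ pvDiffWitnessOut_split_two_by_empty_line.1 ≠ pvDiffWitnessOut_split_two_by_empty_line.2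
def Claim_exact_split_two_by_empty_line : Prop := ∀ (lines : List String), Dom_split_two_by_empty_line lines → D_split_two_by_empty_line lines → split_two_by_empty_line lines ≠ split_two_by_empty_line_alt lines

-- ===== LEMMAS AND PROOFS =====

-- A, phase 1: a blank-free prefix is appended to the left part
theorem pvA_phase1 (p : List String) (l : List String)
    (hp : ∀ x ∈ p, ¬ PySem.Str.strip x = "") :
    p.foldl pvStepA (l, [], false) = (l ++ p, [], false) := by
  induction p generalizing l with
  | nil => simp
  | cons x xs ih =>
    have hx := hp x (by simp)
    have hstep : pvStepA (l, [], false) x = (l ++ [x], [], false) := by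
      simp [pvStepA, hx]
    rw [List.foldl_cons, hstep, ih (l ++ [x]) (fun y hy => hp y (by simp [hy]))]
    simp

-- A, phase 2: as long as the right part never equals the left part at a blank line,
-- every line is appended to the right part
theorem pvA_phase2 (s : List String) (L r : List String)
    (h : ∀ k, (hk : k < s.length) → PySem.Str.strip s[k] = "" → r ++ s.take k ≠ L) :
    s.foldl pvStepA (L, r, true) = (L, r ++ s, true) := by
  induction s generalizing r with
  | nil => simp
  | cons x xs ih =>
    have hstep : pvStepA (L, r, true) x = (L, r ++ [x], true) := by
      by_cases hb : PySem.Str.strip x = ""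
      · have hne : r ≠ L := by
          have := h 0 (by simp) (by simpa using hb)
          simpa using this
        simp [pvStepA, hb, hne]
      · simp [pvStepA, hb]
    simp only [List.foldl_cons, hstep]
    rw [ih (r ++ [x]) ?_]
    · simp
    · intro k hk hbk heq
      exact h (k + 1) (by simpa using Nat.succ_lt_succ hk) (by simpa using hbk)
        (by simpa [List.take_succ_cons] using heq)

-- A, phase 2 keeps the left part and the flag, and adds at most one line per input line
theorem pvA_phase2_shape (s : List String) (L r : List String) :
    ∃ X : List String, s.foldl pvStepA (L, r, true) = (L, X, true) ∧
      X.length ≤ r.length + s.length := by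
  induction s generalizing r with
  | nil => exact ⟨r, by simp⟩
  | cons x xs ih =>
    by_cases hc : PySem.Str.strip x = "" ∧ r = L
    · obtain ⟨X, hX, hlen⟩ := ih r
      refine ⟨X, ?_, by simpa using Nat.le_succ_of_le hlen⟩
      simpa [List.foldl_cons, pvStepA, hc.1, hc.2] using hX
    · obtain ⟨X, hX, hlen⟩ := ih (r ++ [x])
      have hstep : pvStepA (L, r, true) x = (L, r ++ [x], true) := by
        by_cases hb : PySem.Str.strip x = ""
        · have : r ≠ L := fun h => hc ⟨hb, h⟩
          simp [pvStepA, hb, this]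
        · simp [pvStepA, hb]
      refine ⟨X, by simpa [List.foldl_cons, hstep] using hX, ?_⟩
      simpa [Nat.add_comm, Nat.add_left_comm] using hlen

-- B on a list with a blank-free prefix followed by a blank line
theorem pvFindBlank_enum (p : List String) (b : String) (s : List String) (k : Int)
    (hp : ∀ x ∈ p, ¬ PySem.Str.strip x = "") (hb : PySem.Str.strip b = "") :
    pvFindBlank (PySem.List.enumerate (p ++ b :: s) k) = some (k + p.length) := by
  induction p generalizing k with
  | nil => simp [PySem.List.enumerate_cons, pvFindBlank, hb]
  | cons x xs ih =>
    have hx := hp x (by simp)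
    rw [List.cons_append, PySem.List.enumerate_cons]
    simp only [pvFindBlank, if_neg hx]
    rw [ih (k + 1) (fun y hy => hp y (by simp [hy]))]
    congr 1
    simp only [List.length_cons]
    push_cast
    ring

theorem pvFindBlank_none (p : List String) (k : Int)
    (hp : ∀ x ∈ p, ¬ PySem.Str.strip x = "") :
    pvFindBlank (PySem.List.enumerate p k) = none := by
  induction p generalizing k with
  | nil => simp [PySem.List.enumerate_nil, pvFindBlank]
  | cons x xs ih =>
    rw [PySem.List.enumerate_cons]
    simp only [pvFindBlank, if_neg (hp x (by simp))]
    exact ih (k + 1) (fun y hy => hp y (by simp [hy]))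

theorem pvB_split (p : List String) (b : String) (s : List String)
    (hp : ∀ x ∈ p, ¬ PySem.Str.strip x = "") (hb : PySem.Str.strip b = "") :
    split_two_by_empty_line_alt (p ++ b :: s) = (p, s) := by
  unfold split_two_by_empty_line_alt
  rw [pvFindBlank_enum p b s 0 hp hb]
  simp only [zero_add]
  rw [show ((p.length : Nat) : Int) + 1 = ((p.length + 1 : Nat) : Int) by push_cast; ring]
  rw [PySem.List.slice_to_natCast, PySem.List.slice_from_natCast]
  refine Prod.ext ?_ ?_
  · simp
  · rw [show p ++ b :: s = (p ++ [b]) ++ s by simp,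
        show p.length + 1 = (p ++ [b]).length by simp, List.drop_left]

theorem pvB_none (p : List String) (hp : ∀ x ∈ p, ¬ PySem.Str.strip x = "") :
    split_two_by_empty_line_alt p = (p, []) := by
  unfold split_two_by_empty_line_alt
  rw [pvFindBlank_none p 0 hp]

-- the first blank line really is blank, and everything before it is not
theorem pvFirstBlank_blank (lines : List String) (h : pvFirstBlankIdx lines < lines.length) :
    PySem.Str.strip lines[pvFirstBlankIdx lines] = "" := by
  have := List.findIdx_getElem (p := fun s => PySem.Str.strip s == "") (xs := lines) (w := h)
  simpa using this

theorem pvFirstBlank_prefix (lines : List String) (k : Nat) (hk : k < pvFirstBlankIdx lines)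
    (hlen : k < lines.length) : ¬ PySem.Str.strip lines[k] = "" := by
  have := List.not_of_lt_findIdx (p := fun s => PySem.Str.strip s == "") (xs := lines) hk
  simpa using this

theorem pv_main (lines : List String) (hD : ¬ D_split_two_by_empty_line lines) :
    split_two_by_empty_line lines = split_two_by_empty_line_alt lines := by
  by_cases hlt : pvFirstBlankIdx lines < lines.length
  · set i := pvFirstBlankIdx lines with hi
    set p := lines.take i with hp
    set s := lines.drop (i + 1) with hs
    have hdecomp : lines = p ++ lines[i] :: s := by
      rw [hp, hs, List.getElem_cons_drop, List.take_append_drop]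
    have hpnb : ∀ x ∈ p, ¬ PySem.Str.strip x = "" := by
      intro x hx
      rw [hp] at hx
      obtain ⟨k, hk, rfl⟩ := List.getElem_of_mem hx
      have hk' : k < i := by rw [List.length_take] at hk; omega
      rw [List.getElem_take]
      exact pvFirstBlank_prefix lines k hk' (lt_of_lt_of_le hk' (le_of_lt hlt))
    have hb : PySem.Str.strip lines[i] = "" := pvFirstBlank_blank lines hlt
    have hplen : p.length = i := by simp [hp, le_of_lt hlt]
    -- phase-2 side condition from ¬D
    have hcond : ∀ k, (hk : k < s.length) → PySem.Str.strip s[k] = "" →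
        ([] : List String) ++ s.take k ≠ p := by
      intro k hk hbk heq
      apply hD
      refine ⟨i + 1 + k, ?_, by omega, ?_, ?_⟩
      · have : i + 1 + k < lines.length := by
          have := hk; rw [hs, List.length_drop] at this; omega
        simpa [Finset.mem_range] using this
      · have hkl : i + 1 + k < lines.length := by
          have := hk; rw [hs, List.length_drop] at this; omega
        rw [List.getD_eq_getElem _ _ hkl]
        have hsk : s[k] = lines[i + 1 + k] := by
          simp [hs, List.getElem_drop]
        rw [← hsk]; exact hbk
      · rw [show i + 1 + k - i - 1 = k by omega]
        simpa using heq
    have hA : split_two_by_empty_line lines = (p, s) := by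
      unfold split_two_by_empty_line
      conv_lhs => rw [hdecomp]
      rw [List.foldl_append, pvA_phase1 p [] (by simpa using hpnb), List.foldl_cons]
      have hstep : pvStepA (([] : List String) ++ p, [], false) lines[i] = (p, [], true) := by
        simp [pvStepA, hb]
      rw [hstep, pvA_phase2 s p [] hcond]
      simp
    rw [hA, hdecomp, pvB_split p lines[i] s hpnb hb]
  · -- no blank line at all
    have hall : ∀ x ∈ lines, ¬ PySem.Str.strip x = "" := by
      intro x hx
      obtain ⟨k, hk, rfl⟩ := List.getElem_of_mem hx
      exact pvFirstBlank_prefix lines k (by omega) hk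
    have hA : split_two_by_empty_line lines = (lines, []) := by
      unfold split_two_by_empty_line
      rw [pvA_phase1 lines [] hall]
      simp
    rw [hA, pvB_none lines hall]

-- ===== VERDICT (by name: the statement is the Claim_ definition above) =====
theorem split_two_by_empty_line_spec : Claim_unchanged_split_two_by_empty_line := by
  intro lines _ hD
  exact pv_main lines hD

theorem split_two_by_empty_line_changed : Claim_changed_split_two_by_empty_line := by
  unfold Claim_changed_split_two_by_empty_line; decide

theorem split_two_by_empty_line_tight : Claim_exact_split_two_by_empty_line := by
  intro lines _ hD
  obtain ⟨j, hjmem, hij, hbj, heq⟩ := hD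
  rw [Finset.mem_range] at hjmem
  set i := pvFirstBlankIdx lines with hi
  have hlt : i < lines.length := lt_trans hij hjmem
  set p := lines.take i with hp
  set s := lines.drop (i + 1) with hs
  have hdecomp : lines = p ++ lines[i] :: s := by
    rw [hp, hs, List.getElem_cons_drop, List.take_append_drop]
  have hpnb : ∀ x ∈ p, ¬ PySem.Str.strip x = "" := by
    intro x hx
    rw [hp] at hx
    obtain ⟨k, hk, rfl⟩ := List.getElem_of_mem hx
    have hk' : k < i := by rw [List.length_take] at hk; omega
    rw [List.getElem_take]
    exact pvFirstBlank_prefix lines k hk' (lt_of_lt_of_le hk' (le_of_lt hlt))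
  have hb : PySem.Str.strip lines[i] = "" := pvFirstBlank_blank lines hlt
  have hslen : s.length = lines.length - (i + 1) := by rw [hs, List.length_drop]
  have hk1 : j - i - 1 < s.length := by omega
  have hex : ∃ k, k < s.length ∧ PySem.Str.strip (s.getD k "x") = "" ∧ s.take k = p := by
    refine ⟨j - i - 1, hk1, ?_, by simpa using heq⟩
    rw [List.getD_eq_getElem _ _ hk1]
    have : s[j - i - 1]'hk1 = lines[j]'hjmem := by
      simp only [hs, List.getElem_drop]
      congr 1
      omega
    rw [this, ← List.getD_eq_getElem _ "x" hjmem]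
    exact hbj
  set k0 := Nat.find hex with hk0def
  obtain ⟨hk0len, hk0b, hk0t⟩ := Nat.find_spec hex
  set u := s.take k0 with hu
  set v := s.drop (k0 + 1) with hv
  have hulen : u.length = k0 := by rw [hu, List.length_take]; omega
  have hsdecomp : s = u ++ s[k0] :: v := by
    rw [hu, hv, List.getElem_cons_drop, List.take_append_drop]
  -- phase 2 over u: no earlier blank position has right = left, by minimality of k0
  have hcondu : ∀ k, (hk : k < u.length) → PySem.Str.strip u[k] = "" →
      ([] : List String) ++ u.take k ≠ p := by
    intro k hk hbk hteq
    have hkk0 : k < k0 := by omega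
    have hks : k < s.length := by omega
    apply Nat.find_min hex hkk0
    refine ⟨hks, ?_, ?_⟩
    · rw [List.getD_eq_getElem _ _ hks]
      simpa [hu, List.getElem_take] using hbk
    · have : u.take k = s.take k := by
        rw [hu, List.take_take, Nat.min_eq_left (le_of_lt hkk0)]
      rw [← this]; simpa using hteq
  obtain ⟨X, hX, hXlen⟩ := pvA_phase2_shape v p u
  have hA : split_two_by_empty_line lines = (p, X) := by
    unfold split_two_by_empty_line
    conv_lhs => rw [hdecomp]
    rw [List.foldl_append, pvA_phase1 p [] (by simpa using hpnb), List.foldl_cons]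
    have hstep1 : pvStepA (([] : List String) ++ p, [], false) lines[i] = (p, [], true) := by
      simp [pvStepA, hb]
    rw [hstep1]
    conv_lhs => rw [hsdecomp]
    rw [List.foldl_append, pvA_phase2 u p [] hcondu, List.foldl_cons]
    have hbk0 : PySem.Str.strip (s[k0]'hk0len) = "" := by
      rw [← List.getD_eq_getElem _ "x" hk0len]; exact hk0b
    have hstep2 : pvStepA (p, [] ++ u, true) s[k0] = (p, u, true) := by
      simp [pvStepA, hbk0, hk0t]
    rw [hstep2, hX]
  have hB : split_two_by_empty_line_alt lines = (p, s) := by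
    rw [hdecomp, pvB_split p lines[i] s hpnb hb]
  rw [hA, hB]
  intro hcontra
  have hXs : X.length = s.length := congrArg (fun q => q.2.length) hcontra
  have hvlen : v.length = s.length - (k0 + 1) := by rw [hv, List.length_drop]
  omega
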